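-- pv_equiv track=rewrite | github.com/JonasVanhulst/AdventOfCode | 2015/day8/Day_8.py | partTwo
-- ===== SOURCE A (Python) =====
-- def partTwo(content: str) -> int:
--     encoded_length: int = 0
--     original_length: int = 0
--
--     lines = content.splitlines()
--
--     for line in lines:
--         original_length += len(line)
--
--         # Start with two extra characters for the surrounding double quotes
--         encoded_length += 2
--         for char in line:
--             if char == "\\" or char == '"':
--                 # Each backslash or double quote needs to be escaped
--                 encoded_length += 2
--             else:
--                 encoded_length += 1
--
--     return encoded_length - original_length
-- ===== SOURCE B (Python) =====
-- def partTwo(content: str) -> int: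
--     lines = content.splitlines()
--     return 2 * len(lines) + content.count('\\') + content.count('"')
-- ===== Notes on version B (the rewrite author's own statement) =====
-- stated objective: simpler
-- what changed: Replaced the nested per-character loop with two running length accumulators by a closed-form arithmetic expression: 2 per line plus the total count of backslashes and double quotes in the whole content (str.count).
import Mathlib
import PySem

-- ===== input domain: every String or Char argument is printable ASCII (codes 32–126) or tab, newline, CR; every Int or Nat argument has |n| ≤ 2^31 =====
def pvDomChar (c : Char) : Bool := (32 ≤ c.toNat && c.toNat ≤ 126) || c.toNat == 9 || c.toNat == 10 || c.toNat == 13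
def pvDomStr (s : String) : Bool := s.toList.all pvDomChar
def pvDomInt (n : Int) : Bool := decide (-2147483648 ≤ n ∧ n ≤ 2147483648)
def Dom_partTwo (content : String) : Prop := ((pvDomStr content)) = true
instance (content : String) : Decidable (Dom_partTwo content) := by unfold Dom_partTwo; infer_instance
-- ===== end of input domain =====

-- B replaces A's nested per-character loop (two running length accumulators) by a
-- closed-form expression: 2 per line plus the counts of '\' and '"' in the whole content. (objective: simpler)

-- ===== PORT A =====
def partTwo (content : String) : Int :=
  let lines := PySem.Str.splitlines content
  let p := lines.foldl
    (fun (p : Int × Int) line =>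
      let original := p.2 + (PySem.Str.len line : Int)
      let encoded := line.toList.foldl
        (fun e c => if c = '\\' ∨ c = '"' then e + 2 else e + 1) (p.1 + 2)
      (encoded, original))
    (0, 0)
  p.1 - p.2

-- ===== PORT B =====
def partTwo_alt (content : String) : Int :=
  let lines := PySem.Str.splitlines content
  2 * (lines.length : Int)
    + (PySem.Str.count content "\\" : Int) + (PySem.Str.count content "\"" : Int)

-- ===== PRECONDITION & SPEC =====
def Spec_partTwo (content : String) (out : Int) : Prop := out = partTwo_alt content
instance (content : String) (out : Int) : Decidable (Spec_partTwo content out) := by unfold Spec_partTwo; infer_instance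

-- ===== CLAIM (what is proved, stated in full; the proofs are below) =====
def Claim_equal_partTwo : Prop := ∀ (content : String), Dom_partTwo content → Spec_partTwo content (partTwo content)

-- ===== LEMMAS AND PROOFS =====

-- str.count with a single-character needle is List.count
lemma count_go_singleton (c : Char) (s : List Char) (fuel acc : Nat) (h : s.length ≤ fuel) :
    PySem.Chars.count.go [c] fuel s acc = acc + s.count c := by
  induction s generalizing fuel acc with
  | nil => cases fuel <;> simp [PySem.Chars.count.go]
  | cons hd t ih =>
    cases fuel with
    | zero => simp at h
    | succ n =>
      simp only [List.length_cons, Nat.succ_le_succ_iff] at h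
      rw [PySem.Chars.count.go]
      by_cases hc : c = hd
      · subst hc; simp [List.isPrefixOf, ih _ _ h]; omega
      · simp [List.isPrefixOf, Ne.symm hc, hc, ih _ _ h]

lemma count_singleton (c : Char) (s : List Char) :
    PySem.Chars.count s [c] = s.count c := by
  simp [PySem.Chars.count, count_go_singleton c s s.length 0 le_rfl]

-- summed per-line counts of a non-break character equal the whole-content count
lemma go_count (isB : Char → Bool) (c : Char)
    (hcB : isB c = false) (h1 : c ≠ '\n') (h2 : c ≠ '\r') :
    ∀ (s cur : List Char) (acc : List (List Char)),
    ((PySem.Chars.splitlines.go isB s cur acc).map (fun l => l.count c)).sum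
      = (acc.map (fun l => l.count c)).sum + cur.count c + s.count c := by
  intro s cur acc
  induction s, cur, acc using PySem.Chars.splitlines.go.induct (isB := isB) with
  | case1 cur acc hcur =>
    rw [PySem.Chars.splitlines.go]
    simp_all [List.isEmpty_iff]
  | case2 cur acc hcur =>
    rw [PySem.Chars.splitlines.go]
    simp [hcur, List.count_reverse]
    try omega
  | case3 rest cur acc ih =>
    rw [PySem.Chars.splitlines.go.eq_2, ih]
    simp [List.count_reverse, Ne.symm h1, Ne.symm h2]
    omega
  | case4 b rest cur acc hne hB ih =>
    have hbc : b ≠ c := by intro e; rw [e] at hB; rw [hcB] at hB; exact Bool.false_ne_true hB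
    rw [PySem.Chars.splitlines.go.eq_3 _ _ _ _ _ hne, if_pos hB, ih]
    simp [List.count_reverse, hbc]
    omega
  | case5 b rest cur acc hne hB ih =>
    rw [PySem.Chars.splitlines.go.eq_3 _ _ _ _ _ hne, if_neg hB, ih]
    simp only [List.count_cons]
    split_ifs <;> omega

lemma splitlines_count (c : Char) (h : c = '\\' ∨ c = '"') (s : List Char) :
    ((PySem.Chars.splitlines s).map (fun l => l.count c)).sum = s.count c := by
  have h1 : c ≠ '\n' := by rcases h with h | h <;> simp [h]
  have h2 : c ≠ '\r' := by rcases h with h | h <;> simp [h]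
  unfold PySem.Chars.splitlines
  rw [go_count _ c (by rcases h with h | h <;> subst h <;> decide) h1 h2]
  simp

-- A's inner per-character loop in closed form
lemma inner_loop (l : List Char) (e : Int) :
    l.foldl (fun e c => if c = '\\' ∨ c = '"' then e + 2 else e + 1) e
      = e + l.length + l.count '\\' + l.count '"' := by
  induction l generalizing e with
  | nil => simp
  | cons hd t ih =>
    rw [List.foldl_cons, ih]
    by_cases hA : hd = '\\' <;> by_cases hB : hd = '"' <;>
      simp_all <;> push_cast <;> ring

-- A's outer fold in closed form
lemma outer_loop (lines : List String) (e o : Int) :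
    ((lines.foldl
      (fun (p : Int × Int) line =>
        let original := p.2 + (PySem.Str.len line : Int)
        let encoded := line.toList.foldl
          (fun e c => if c = '\\' ∨ c = '"' then e + 2 else e + 1) (p.1 + 2)
        (encoded, original))
      (e, o)).1
      - (lines.foldl
      (fun (p : Int × Int) line =>
        let original := p.2 + (PySem.Str.len line : Int)
        let encoded := line.toList.foldl
          (fun e c => if c = '\\' ∨ c = '"' then e + 2 else e + 1) (p.1 + 2)
        (encoded, original))
      (e, o)).2)
      = e - o + ((lines.map
          (fun l => 2 + (l.toList.count '\\' : Int) + (l.toList.count '"' : Int))).sum) := by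
  induction lines generalizing e o with
  | nil => simp
  | cons hd t ih =>
    rw [List.foldl_cons]
    show ((t.foldl _ (_, _)).1 - (t.foldl _ (_, _)).2) = _
    rw [ih, inner_loop, List.map_cons, List.sum_cons]
    simp [PySem.Str.len]
    push_cast
    ring

lemma str_count_single (c : Char) (s : String) (cs : List Char) (h : cs = [c]) :
    PySem.Chars.count s.toList cs = s.toList.count c := by
  rw [h, count_singleton]

-- ===== VERDICT (by name: the statement is the Claim_ definition above) =====
theorem partTwo_spec : Claim_equal_partTwo := by
  intro content _
  unfold Spec_partTwo partTwo partTwo_alt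
  simp only [PySem.Str.splitlines, outer_loop, List.map_map, List.length_map]
  rw [PySem.Str.count_eq, PySem.Str.count_eq,
      str_count_single '\\' content _ (by decide), str_count_single '"' content _ (by decide),
      ← splitlines_count '\\' (Or.inl rfl) content.toList,
      ← splitlines_count '"' (Or.inr rfl) content.toList]
  generalize PySem.Chars.splitlines content.toList = L
  induction L with
  | nil => simp
  | cons hd t ih =>
    simp only [List.map_cons, List.sum_cons, List.length_cons, Function.comp_apply,
      String.toList_ofList] at *
    push_cast at *
    omega
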